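-- pv_equiv track=rewrite | github.com/alinatl/PROGRAM | hw_7/hw_7.py | without_omni_freq
-- ===== SOURCE A (Python) =====
-- def without_omni_freq(words, omni):
--     #эта функция считывает количество слов без приставки "omni"
--     #и возвращает частотный словарь
--     without_omni = {}
--     for word in omni:
--         if word[4:] in words:
--                 for word_1 in words:
--                     if word_1 == word[4:]:
--                         if word_1 in without_omni:
--                             without_omni[word_1] += 1
--                         else:
--                             without_omni[word_1] = 1
--     return without_omni
-- ===== SOURCE B (Python) =====
-- def without_omni_freq(words, omni):
--     # B: aggregate both sides into frequency tables first, then one multiply-join pass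
--     wc = {}
--     for w in words:
--         wc[w] = wc.get(w, 0) + 1
--     oc = {}
--     for w in omni:
--         stem = w[4:]
--         oc[stem] = oc.get(stem, 0) + 1
--     return {stem: wc[stem] * c for stem, c in oc.items() if stem in wc}
-- ===== Notes on version B (the rewrite author's own statement) =====
-- stated objective: faster
-- what changed: A rescans the whole words list for every omni word and bumps the dict once per match; B builds two frequency tables (words, omni stems) in one pass each and then does a single join pass over the stem table multiplying the two counts.
import Mathlib
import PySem

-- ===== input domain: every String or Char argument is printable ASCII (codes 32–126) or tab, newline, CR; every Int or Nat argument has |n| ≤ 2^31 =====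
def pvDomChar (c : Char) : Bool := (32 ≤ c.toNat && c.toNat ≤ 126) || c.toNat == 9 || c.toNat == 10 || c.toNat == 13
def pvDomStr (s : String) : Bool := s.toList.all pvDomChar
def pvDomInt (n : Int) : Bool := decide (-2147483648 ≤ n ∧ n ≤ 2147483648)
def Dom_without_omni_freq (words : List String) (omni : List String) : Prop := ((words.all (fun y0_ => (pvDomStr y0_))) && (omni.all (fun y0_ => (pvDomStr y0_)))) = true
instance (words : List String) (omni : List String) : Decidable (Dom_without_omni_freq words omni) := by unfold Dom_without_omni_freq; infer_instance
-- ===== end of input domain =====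

-- B replaces A's nested rescan of `words` per omni word by two frequency tables and one
-- multiply-join pass (objective: faster).

-- ===== PORT A =====
def without_omni_freq (words : List String) (omni : List String) : List (String × Int) :=
  (omni.foldl (fun without_omni word =>
    let stem := PySem.Str.slice word (some 4) none
    if words.contains stem then
      words.foldl (fun d word_1 =>
        if word_1 == stem then
          if d.contains word_1 then
            d.insert word_1 (d.getD word_1 0 + 1)
          else
            d.insert word_1 1
        else d) without_omni
    else without_omni) PySem.Dict.empty).items

-- ===== PORT B =====
def without_omni_freq_alt (words : List String) (omni : List String) : List (String × Int) :=
  let wc : PySem.Dict String Int :=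
    words.foldl (fun d w => d.insert w (d.getD w 0 + 1)) PySem.Dict.empty
  let oc : PySem.Dict String Int :=
    omni.foldl (fun d w =>
      let stem := PySem.Str.slice w (some 4) none
      d.insert stem (d.getD stem 0 + 1)) PySem.Dict.empty
  (oc.items.foldl (fun r p =>
    if wc.contains p.1 then r.insert p.1 (wc.getD p.1 0 * p.2) else r)
    PySem.Dict.empty).items

-- ===== PRECONDITION & SPEC =====
def Spec_without_omni_freq (words : List String) (omni : List String) (out : List (String × Int)) : Prop := out = without_omni_freq_alt words omni
instance (words : List String) (omni : List String) (out : List (String × Int)) : Decidable (Spec_without_omni_freq words omni out) := by unfold Spec_without_omni_freq; infer_instance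

-- ===== CLAIM (what is proved, stated in full; the proofs are below) =====
def Claim_equal_without_omni_freq : Prop := ∀ (words : List String) (omni : List String), Dom_without_omni_freq words omni → Spec_without_omni_freq words omni (without_omni_freq words omni)

-- ===== LEMMAS AND PROOFS =====

-- replicate fold
theorem repFold (n : Nat) (s : String) (d : PySem.Dict String Int) :
    (List.replicate n s).foldl (fun d w1 =>
      if d.contains w1 then d.insert w1 (d.getD w1 0 + 1) else d.insert w1 1) d
    = if n = 0 then d else d.insert s (d.getD s 0 + n) := by
  induction n generalizing d with
  | zero => simp
  | succ n ih =>
    have hstep : (if d.contains s then d.insert s (d.getD s 0 + 1) else d.insert s 1)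
        = d.insert s (d.getD s 0 + 1) := by
      by_cases h : d.contains s = true
      · simp [h]
      · simp [h, PySem.Dict.getD_of_not_contains]
    rw [List.replicate_succ, List.foldl_cons, hstep, ih]
    by_cases hn : n = 0
    · simp [hn]
    · simp only [hn, if_false, Nat.succ_ne_zero, PySem.Dict.insert_insert_self,
        PySem.Dict.getD_insert_self]
      congr 1
      push_cast
      ring

-- inner loop of A
theorem innerA (ws : List String) (s : String) (d : PySem.Dict String Int) :
    ws.foldl (fun d w1 =>
      if w1 == s then
        if d.contains w1 then d.insert w1 (d.getD w1 0 + 1) else d.insert w1 1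
      else d) d
    = if ws.contains s then d.insert s (d.getD s 0 + ws.count s) else d := by
  rw [PySem.List.foldl_if_eq_foldl_filter, List.filter_beq, repFold]
  by_cases h : s ∈ ws
  · simp [h, List.count_eq_zero.not.mpr (by simpa using h)]
  · simp [h, List.count_eq_zero.mpr h]

-- weighted counter: items of the increment-by-m fold
theorem weightedItems (m : String → Int) (l : List String) :
    (l.foldl (fun d s => d.insert s (d.getD s 0 + m s)) PySem.Dict.empty).items
    = (PySem.Set.ofList l).map (fun s => (s, (l.count s : Int) * m s)) := by
  induction l using List.reverseRecOn with
  | nil => simp [PySem.Set.ofList_nil, PySem.Dict.empty]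
  | append_singleton l s ih =>
    have hkeys : (l.foldl (fun d s => d.insert s (d.getD s 0 + m s)) PySem.Dict.empty).keys
        = PySem.Set.ofList l := by
      simp only [PySem.Dict.keys, ih, List.map_map]
      simp only [Function.comp_def]
      exact List.map_id _
    have hnd : (l.foldl (fun d s => d.insert s (d.getD s 0 + m s)) PySem.Dict.empty).keys.Nodup := by
      rw [hkeys]; exact PySem.Set.nodup_ofList l
    rw [List.foldl_append, List.foldl_cons, List.foldl_nil]
    by_cases hmem : s ∈ l
    · have hcont : (l.foldl (fun d s => d.insert s (d.getD s 0 + m s)) PySem.Dict.empty).contains s = true := by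
        rw [PySem.Dict.contains_eq_decide_mem_keys, hkeys]
        simp [PySem.Set.mem_ofList, hmem]
      have hgd : (l.foldl (fun d s => d.insert s (d.getD s 0 + m s)) PySem.Dict.empty).getD s 0
          = (l.count s : Int) * m s := by
        refine PySem.Dict.getD_of_mem_items _ ?_ hnd 0
        rw [ih]
        exact List.mem_map.mpr ⟨s, (PySem.Set.mem_ofList _ _).mpr hmem, rfl⟩
      rw [PySem.Dict.items_insert_of_contains _ _ hcont, ih, hgd,
        PySem.Set.ofList_append_singleton, PySem.Set.add_of_mem ((PySem.Set.mem_ofList _ _).mpr hmem),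
        List.map_map]
      refine List.map_congr_left ?_
      intro t ht
      have htl : t ∈ l := (PySem.Set.mem_ofList _ _).mp ht
      by_cases hts : t = s
      · subst hts
        simp [List.count_append]
        ring
      · simp [Function.comp, hts, List.count_append, List.count_singleton,
          beq_iff_eq]
        exact Or.inl fun h => hts h.symm
    · have hcont : (l.foldl (fun d s => d.insert s (d.getD s 0 + m s)) PySem.Dict.empty).contains s = false := by
        rw [PySem.Dict.contains_eq_decide_mem_keys, hkeys]
        simp [PySem.Set.mem_ofList, hmem]
      have hgd : (l.foldl (fun d s => d.insert s (d.getD s 0 + m s)) PySem.Dict.empty).getD s 0 = 0 :=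
        PySem.Dict.getD_of_not_contains _ 0 hcont
      rw [PySem.Dict.items_insert_of_not_contains _ _ hcont, ih, hgd,
        PySem.Set.ofList_append_singleton,
        PySem.Set.add_of_not_mem (fun h => hmem ((PySem.Set.mem_ofList _ _).mp h)),
        List.map_append]
      congr 1
      · refine List.map_congr_left ?_
        intro t ht
        have htl : t ∈ l := (PySem.Set.mem_ofList _ _).mp ht
        have hts : t ≠ s := fun h => hmem (h ▸ htl)
        simp [List.count_append, List.count_singleton]
        exact Or.inl fun h => hts h.symm
      · simp [List.count_append, List.count_eq_zero.mpr hmem]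

-- ofList commutes with filter
theorem ofListFilter (p : String → Bool) (l : List String) :
    PySem.Set.ofList (l.filter p) = (PySem.Set.ofList l).filter p := by
  induction l using List.reverseRecOn with
  | nil => simp [PySem.Set.ofList_nil]
  | append_singleton l s ih =>
    rw [List.filter_append, PySem.Set.ofList_append_singleton]
    by_cases hp : p s = true
    · simp only [List.filter_singleton, hp, cond_true]
      rw [PySem.Set.ofList_append_singleton, ih]
      by_cases hmem : s ∈ PySem.Set.ofList l
      · rw [PySem.Set.add_of_mem hmem,
          PySem.Set.add_of_mem (List.mem_filter.mpr ⟨hmem, hp⟩)]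
      · rw [PySem.Set.add_of_not_mem hmem,
          PySem.Set.add_of_not_mem (fun h => hmem (List.mem_filter.mp h).1)]
        simp [List.filter_append, hp]
    · simp only [List.filter_singleton, hp, cond_false, List.append_nil, ih]
      by_cases hmem : s ∈ PySem.Set.ofList l
      · rw [PySem.Set.add_of_mem hmem]
      · rw [PySem.Set.add_of_not_mem hmem, List.filter_append]
        simp [hp]


-- ===== VERDICT (by name: the statement is the Claim_ definition above) =====
theorem without_omni_freq_spec : Claim_equal_without_omni_freq := by
  unfold Claim_equal_without_omni_freq
  intro words omni _
  unfold Spec_without_omni_freq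
  unfold without_omni_freq without_omni_freq_alt
  simp only []
  -- A side: collapse the nested scan into a weighted-increment fold over the stems
  have hbody : ∀ (d : PySem.Dict String Int) (w : String), w ∈ omni →
      (if words.contains (PySem.Str.slice w (some 4) none) then
         words.foldl (fun d word_1 =>
           if word_1 == PySem.Str.slice w (some 4) none then
             if d.contains word_1 then d.insert word_1 (d.getD word_1 0 + 1)
             else d.insert word_1 1
           else d) d
       else d)
      = (if words.contains (PySem.Str.slice w (some 4) none) then
           d.insert (PySem.Str.slice w (some 4) none)
             (d.getD (PySem.Str.slice w (some 4) none) 0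
               + (words.count (PySem.Str.slice w (some 4) none) : Int))
         else d) := by
    intro d w _
    simp only [innerA, List.contains_iff_mem]
    by_cases h : PySem.Str.slice w (some 4) none ∈ words <;> simp [h]
  have hA := PySem.List.foldl_congr_mem omni _ _ (PySem.Dict.empty : PySem.Dict String Int) hbody
  rw [hA]
  have hmap := List.foldl_map (f := fun w => PySem.Str.slice w (some 4) none)
    (g := fun (d : PySem.Dict String Int) s =>
      if words.contains s then d.insert s (d.getD s 0 + (words.count s : Int)) else d)
    (l := omni) (init := PySem.Dict.empty)
  rw [← hmap, PySem.List.foldl_if_eq_foldl_filter, weightedItems, ofListFilter]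
  -- B side
  rw [PySem.Dict.foldl_insert_getD_add_one_eq_counter]
  have hocmap := List.foldl_map (f := fun w => PySem.Str.slice w (some 4) none)
    (g := fun (d : PySem.Dict String Int) s => d.insert s (d.getD s 0 + 1))
    (l := omni) (init := PySem.Dict.empty)
  rw [← hocmap, PySem.Dict.foldl_insert_getD_add_one_eq_counter,
    PySem.List.foldl_if_eq_foldl_filter]
  rw [PySem.Dict.items_foldl_insert_fresh _ Prod.fst
      (fun p => (PySem.Dict.counter words).getD p.1 0 * p.2) PySem.Dict.empty
      (fun a _ => PySem.Dict.contains_empty _)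
      ?hnd]
  case hnd =>
    refine List.Nodup.sublist (List.Sublist.map Prod.fst List.filter_sublist) ?_
    have := PySem.Dict.nodup_keys_counter (xs := omni.map (fun w => PySem.Str.slice w (some 4) none))
    simpa [PySem.Dict.keys] using this
  rw [PySem.Dict.items_counter, List.filter_map, List.filter_map, List.map_map]
  simp only [PySem.Dict.empty, List.nil_append, Function.comp_def,
    PySem.Dict.contains_counter, PySem.Dict.getD_counter]
  refine List.map_congr_left ?_
  intro s hs
  have hps : words.contains s = true := (List.mem_filter.mp hs).2
  have hcnt : List.count s (List.map (fun w => PySem.Str.slice w (some 4) none)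
        (List.filter (fun w => words.contains (PySem.Str.slice w (some 4) none)) omni))
      = List.count s (List.map (fun w => PySem.Str.slice w (some 4) none) omni) := by
    rw [show (fun w => words.contains (PySem.Str.slice w (some 4) none))
        = (words.contains ∘ (fun w => PySem.Str.slice w (some 4) none)) from rfl,
      ← List.filter_map, List.count_filter hps]
  rw [hcnt]
  ring_nf
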